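-- pv_equiv track=rewrite | github.com/HOLYKEYZ/VULNRIX | risk_analyzer.py | detect_fame
-- ===== SOURCE A (Python) =====
-- from typing import Dict, List, Optional, Tuple
--
-- def detect_fame(name: Optional[str], search_results: Dict[str, List[Dict]]) -> bool:
--     """
--     Detect if the person is likely a public figure based on search results.
--
--     Args:
--         name: Name to check
--         search_results: Search results dictionary
--
--     Returns:
--         True if likely a public figure, False otherwise
--     """
--     if not name:
--         return False
--
--     name_results = search_results.get('name', [])
--
--     # Heuristics for fame detection:
--     # 1. High number of name mentions (>20)
--     # 2. Results mention "Wikipedia", "celebrity", "famous", "actor", "politician", etc.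
--     if len(name_results) > 20:
--         # Check for public figure indicators in results
--         fame_indicators = [
--             'wikipedia', 'celebrity', 'famous', 'actor', 'actress',
--             'politician', 'athlete', 'singer', 'musician', 'author',
--             'director', 'producer', 'news', 'biography', 'official'
--         ]
--
--         for result in name_results[:10]:  # Check first 10 results
--             title = result.get('title', '').lower()
--             snippet = result.get('snippet', '').lower()
--             combined = title + ' ' + snippet
--
--             if any(indicator in combined for indicator in fame_indicators):
--                 return True
--
--     return False
-- ===== SOURCE B (Python) =====
-- def detect_fame(name, search_results):
--     if not name:
--         return False
--     name_results = search_results.get('name', [])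
--     if len(name_results) <= 20:
--         return False
--     fame_indicators = [
--         'wikipedia', 'celebrity', 'famous', 'actor', 'actress',
--         'politician', 'athlete', 'singer', 'musician', 'author',
--         'director', 'producer', 'news', 'biography', 'official'
--     ]
--     combined_text = ' '.join(
--         result.get('title', '').lower() + ' ' + result.get('snippet', '').lower()
--         for result in name_results[:10]
--     )
--     return any(indicator in combined_text for indicator in fame_indicators)
-- ===== Notes on version B (the rewrite author's own statement) =====
-- stated objective: alternative
-- what changed: The per-result loop with early exit and per-result indicator scan is replaced by building one space-joined lowercased text from the first 10 results and doing a single substring scan per indicator; correct because no indicator contains a space, so none can straddle a join boundary.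
import Mathlib
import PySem

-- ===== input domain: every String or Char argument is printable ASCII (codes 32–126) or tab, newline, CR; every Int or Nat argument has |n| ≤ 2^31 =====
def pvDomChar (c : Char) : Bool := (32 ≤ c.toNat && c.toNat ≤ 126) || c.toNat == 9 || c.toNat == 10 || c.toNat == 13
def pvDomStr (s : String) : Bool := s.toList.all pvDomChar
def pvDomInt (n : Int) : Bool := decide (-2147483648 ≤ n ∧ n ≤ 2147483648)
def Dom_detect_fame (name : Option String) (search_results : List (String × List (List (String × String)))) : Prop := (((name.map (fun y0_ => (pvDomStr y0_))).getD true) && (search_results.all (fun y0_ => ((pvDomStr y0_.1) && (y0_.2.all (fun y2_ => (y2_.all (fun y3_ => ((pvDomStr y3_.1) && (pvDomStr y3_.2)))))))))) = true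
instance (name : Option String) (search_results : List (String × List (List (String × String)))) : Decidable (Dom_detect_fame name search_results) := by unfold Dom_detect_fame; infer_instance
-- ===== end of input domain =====

-- One-line summary: B builds one space-joined lowercased text of the first 10 results and scans it
-- once per indicator, instead of A's per-result loop with early exit; return values proved equal.

-- ===== PORT A =====
-- the shared literal indicator list (inline in both Pythons)
def fameIndicators : List String :=
  ["wikipedia", "celebrity", "famous", "actor", "actress",
   "politician", "athlete", "singer", "musician", "author",
   "director", "producer", "news", "biography", "official"]

-- A's combined per-result text: title.lower() + ' ' + snippet.lower()
def combinedOf (r : List (String × String)) : String :=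
  PySem.Str.lower ((PySem.Dict.mk r).getD "title" "") ++ " " ++
    PySem.Str.lower ((PySem.Dict.mk r).getD "snippet" "")

-- A's for-loop with early return over the first-10 slice
def detectFameLoop (results : List (List (String × String))) : Bool :=
  match results with
  | [] => false
  | r :: rest =>
    let combined := combinedOf r
    if fameIndicators.any (fun ind => PySem.Str.isIn ind combined) then true
    else detectFameLoop rest

def detect_fame (name : Option String) (search_results : List (String × List (List (String × String)))) : Bool :=
  match name with
  | none => false
  | some s =>
    if s = "" then false
    else
      let name_results := (PySem.Dict.mk search_results).getD "name" []
      if name_results.length > 20 then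
        detectFameLoop (PySem.List.slice name_results none (some 10))
      else false

-- ===== PORT B =====
def detect_fame_alt (name : Option String) (search_results : List (String × List (List (String × String)))) : Bool :=
  match name with
  | none => false
  | some s =>
    if s = "" then false
    else
      let name_results := (PySem.Dict.mk search_results).getD "name" []
      if name_results.length ≤ 20 then false
      else
        let combined_text :=
          PySem.Str.join " "
            ((PySem.List.slice name_results none (some 10)).map combinedOf)
        fameIndicators.any (fun ind => PySem.Str.isIn ind combined_text)

-- ===== PRECONDITION & SPEC =====
def Spec_detect_fame (name : Option String) (search_results : List (String × List (List (String × String)))) (out : Bool) : Prop := out = detect_fame_alt name search_results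
instance (name : Option String) (search_results : List (String × List (List (String × String)))) (out : Bool) : Decidable (Spec_detect_fame name search_results out) := by unfold Spec_detect_fame; infer_instance

-- ===== CLAIM (what is proved, stated in full; the proofs are below) =====
def Claim_equal_detect_fame : Prop := ∀ (name : Option String) (search_results : List (String × List (List (String × String)))), Dom_detect_fame name search_results → Spec_detect_fame name search_results (detect_fame name search_results)

-- ===== LEMMAS AND PROOFS =====

-- An infix avoiding c cannot straddle a c boundary.
theorem infix_append_cons_iff {α : Type} (c : α) (w a b : List α) (hc : c ∉ w) :
    w <:+: a ++ c :: b ↔ w <:+: a ∨ w <:+: b := by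
  constructor
  · rintro ⟨s, t, h⟩
    by_cases h1 : s.length + w.length ≤ a.length
    · left
      have hd : (a ++ c :: b).drop s.length = a.drop s.length ++ c :: b := by
        rw [List.drop_append_of_le_length (by omega)]
      have hw : w <+: a.drop s.length ++ c :: b := by
        refine ⟨t, ?_⟩
        rw [← hd, ← h]
        simp [List.drop_left']
      have hwa : w <+: a.drop s.length :=
        List.prefix_of_prefix_length_le hw (List.prefix_append _ _) (by simp; omega)
      exact hwa.isInfix.trans (List.drop_suffix _ _).isInfix
    · by_cases h2 : a.length < s.length
      · right
        obtain ⟨k, hk⟩ : ∃ k, s.length = a.length + 1 + k :=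
          ⟨s.length - a.length - 1, by omega⟩
        have hd : (a ++ c :: b).drop s.length = b.drop k := by
          rw [hk, show a ++ c :: b = (a ++ [c]) ++ b by simp,
            show a.length + 1 + k = (a ++ [c]).length + k by simp, List.drop_append]
          simp
        have hw : w <+: b.drop k := by
          refine ⟨t, ?_⟩
          rw [← hd, ← h]
          simp [List.drop_left']
        exact hw.isInfix.trans (List.drop_suffix _ _).isInfix
      · exfalso
        apply hc
        have e1 : ((s ++ w) ++ t)[a.length]? = w[a.length - s.length]? := by
          rw [List.getElem?_append_left (by simp; omega),
            List.getElem?_append_right (by omega)]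
        have e2 : (a ++ c :: b)[a.length]? = some c := by
          rw [List.getElem?_append_right (le_refl _)]
          simp
        have e3 : w[a.length - s.length]? = some c := by rw [← e1, h, e2]
        exact List.mem_of_getElem? e3
  · rintro (h | h)
    · exact h.trans (List.prefix_append _ _).isInfix
    · exact h.trans ((List.suffix_cons c b).trans (List.suffix_append _ _)).isInfix

-- A space-free nonempty word is in the space-join iff it is in some piece.
theorem infix_join_space (w : List Char) (hc : ' ' ∉ w) (hne : w ≠ [])
    (ps : List (List Char)) :
    w <:+: PySem.Chars.join [' '] ps ↔ ∃ p ∈ ps, w <:+: p := by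
  induction ps with
  | nil => simp [PySem.Chars.join_nil, List.infix_nil, hne]
  | cons p ps ih =>
    cases ps with
    | nil => simp [PySem.Chars.join_singleton]
    | cons q rest =>
      rw [PySem.Chars.join_cons_cons, List.append_assoc, List.singleton_append,
        infix_append_cons_iff ' ' w _ _ hc]
      simp only [List.mem_cons, ih]
      constructor
      · rintro (h | ⟨x, hx, h⟩)
        · exact ⟨p, Or.inl rfl, h⟩
        · exact ⟨x, Or.inr hx, h⟩
      · rintro ⟨x, (rfl | hx), h⟩
        · exact Or.inl h
        · exact Or.inr ⟨x, hx, h⟩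

theorem detectFameLoop_eq_any (results : List (List (String × String))) :
    detectFameLoop results
      = results.any (fun r => fameIndicators.any (fun ind => PySem.Str.isIn ind (combinedOf r))) := by
  induction results with
  | nil => rfl
  | cons r rest ih =>
    simp only [detectFameLoop, List.any_cons]
    split <;> simp_all

theorem core_eq (results : List (List (String × String))) :
    detectFameLoop results
      = fameIndicators.any (fun ind =>
          PySem.Str.isIn ind (PySem.Str.join " " (results.map combinedOf))) := by
  have hind : ∀ ind ∈ fameIndicators, ' ' ∉ ind.toList ∧ ind.toList ≠ [] := by decide
  rw [detectFameLoop_eq_any, Bool.eq_iff_iff]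
  simp only [List.any_eq_true, PySem.Str.isIn_iff_infix, PySem.Str.toList_join]
  constructor
  · rintro ⟨r, hr, ind, hi, h⟩
    refine ⟨ind, hi, ?_⟩
    rw [show (" " : String).toList = [' '] from rfl,
      infix_join_space _ (hind ind hi).1 (hind ind hi).2]
    exact ⟨(combinedOf r).toList, by simp; exact ⟨r, hr, rfl⟩, h⟩
  · rintro ⟨ind, hi, h⟩
    rw [show (" " : String).toList = [' '] from rfl,
      infix_join_space _ (hind ind hi).1 (hind ind hi).2] at h
    obtain ⟨p, hp, h⟩ := h
    simp only [List.map_map, List.mem_map] at hp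
    obtain ⟨r, hr, rfl⟩ := hp
    exact ⟨r, hr, ind, hi, h⟩

-- ===== VERDICT (by name: the statement is the Claim_ definition above) =====
theorem detect_fame_spec : Claim_equal_detect_fame := by
  intro name search_results _
  unfold Spec_detect_fame detect_fame detect_fame_alt
  cases name with
  | none => rfl
  | some s =>
    dsimp only
    by_cases hs : s = ""
    · rw [if_pos hs, if_pos hs]
    · rw [if_neg hs, if_neg hs]
      by_cases hlen : ((PySem.Dict.mk search_results).getD "name" []).length > 20
      · rw [if_pos hlen, if_neg (by omega), core_eq]
      · rw [if_neg hlen, if_pos (by omega)]
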